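-- pv_equiv track=rewrite | github.com/micropuma/nano-vllm | tests/test_chunked_prefill.py | compute_slot_mapping
-- ===== SOURCE A (Python) =====
-- def compute_slot_mapping(block_table, block_size, start, end):
--     """Replicate prepare_prefill's slot_mapping computation."""
--     if start >= end:
--         return []
--     slots = []
--     start_block_idx = start // block_size
--     end_block_idx = (end - 1) // block_size
--     for i in range(start_block_idx, end_block_idx + 1):
--         block_id = block_table[i]
--         block_token_start = i * block_size
--         in_block_start = max(0, start - block_token_start)
--         in_block_end = min(block_size, end - block_token_start)
--         slot_start = block_id * block_size + in_block_start
--         slot_end = block_id * block_size + in_block_end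
--         slots.extend(range(slot_start, slot_end))
--     return slots
-- ===== SOURCE B (Python) =====
-- def compute_slot_mapping(block_table, block_size, start, end):
--     """Per-token pass: compute each slot directly from the token index."""
--     return [block_table[t // block_size] * block_size + t % block_size
--             for t in range(start, end)]
-- ===== Notes on version B (the rewrite author's own statement) =====
-- stated objective: simpler
-- what changed: B replaces A's block-level loop with its start/end-block index arithmetic and per-block contiguous range assembly by a single flat per-token comprehension computing each slot as block_table[t//block_size]*block_size + t%block_size.
-- outside the precondition, e.g. on compute_slot_mapping([5], -2, 0, 1): A returns [], B returns [-10]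
import Mathlib
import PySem

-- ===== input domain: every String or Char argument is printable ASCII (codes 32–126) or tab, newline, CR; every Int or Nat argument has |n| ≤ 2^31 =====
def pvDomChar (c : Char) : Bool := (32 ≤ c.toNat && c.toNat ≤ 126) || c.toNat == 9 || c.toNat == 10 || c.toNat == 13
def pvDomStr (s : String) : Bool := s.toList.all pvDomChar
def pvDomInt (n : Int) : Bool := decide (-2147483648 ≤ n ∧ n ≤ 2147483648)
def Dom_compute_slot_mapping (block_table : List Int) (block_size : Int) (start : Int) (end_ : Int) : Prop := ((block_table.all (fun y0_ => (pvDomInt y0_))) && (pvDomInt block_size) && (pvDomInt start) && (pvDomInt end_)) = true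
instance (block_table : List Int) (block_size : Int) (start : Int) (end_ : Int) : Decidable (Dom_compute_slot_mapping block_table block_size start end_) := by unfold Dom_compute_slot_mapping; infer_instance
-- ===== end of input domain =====

-- B replaces A's block-level loop (start/end-block arithmetic + per-block range assembly) by a
-- single flat per-token pass computing each slot directly; objective: simpler.

-- ===== PORT A =====
def compute_slot_mapping (block_table : List Int) (block_size : Int) (start : Int) (end_ : Int) : List Int :=
  if start ≥ end_ then []
  else
    let start_block_idx := PySem.Int.floordiv start block_size
    let end_block_idx := PySem.Int.floordiv (end_ - 1) block_size
    (PySem.List.pyRange start_block_idx (end_block_idx + 1) 1).foldl (fun slots i =>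
      let block_id := PySem.List.pyGetD block_table i 0
      let block_token_start := i * block_size
      let in_block_start := max 0 (start - block_token_start)
      let in_block_end := min block_size (end_ - block_token_start)
      let slot_start := block_id * block_size + in_block_start
      let slot_end := block_id * block_size + in_block_end
      slots ++ PySem.List.pyRange slot_start slot_end 1) []

-- ===== PORT B =====
def compute_slot_mapping_alt (block_table : List Int) (block_size : Int) (start : Int) (end_ : Int) : List Int :=
  (PySem.List.pyRange start end_ 1).map (fun t =>
    PySem.List.pyGetD block_table (PySem.Int.floordiv t block_size) 0 * block_size
      + PySem.Int.mod t block_size)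

-- ===== PRECONDITION & SPEC =====
-- Pre_ excludes, besides inputs where A raises (block_size = 0 → ZeroDivisionError; a token window
-- reaching outside the block table → IndexError), the inputs with start < end_ and negative
-- block_size, where A's negative-divisor floor arithmetic accidentally returns [] although the
-- window is nonempty — a value outside the function's natural domain of positive block sizes.
def Pre_compute_slot_mapping (block_table : List Int) (block_size : Int) (start : Int) (end_ : Int) : Prop :=
  end_ ≤ start ∨
    (0 < block_size ∧ -(block_size * (block_table.length : Int)) ≤ start ∧
      end_ ≤ block_size * (block_table.length : Int))
instance (block_table : List Int) (block_size : Int) (start : Int) (end_ : Int) : Decidable (Pre_compute_slot_mapping block_table block_size start end_) := by unfold Pre_compute_slot_mapping; infer_instance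

def pvWitness_compute_slot_mapping : List Int × Int × Int × Int := ([3, 7], 2, 1, 4)

def Spec_compute_slot_mapping (block_table : List Int) (block_size : Int) (start : Int) (end_ : Int) (out : List Int) : Prop := out = compute_slot_mapping_alt block_table block_size start end_
instance (block_table : List Int) (block_size : Int) (start : Int) (end_ : Int) (out : List Int) : Decidable (Spec_compute_slot_mapping block_table block_size start end_ out) := by unfold Spec_compute_slot_mapping; infer_instance

-- ===== CLAIM (what is proved, stated in full; the proofs are below) =====
def Claim_equal_compute_slot_mapping : Prop := ∀ (block_table : List Int) (block_size : Int) (start : Int) (end_ : Int), Dom_compute_slot_mapping block_table block_size start end_ → Pre_compute_slot_mapping block_table block_size start end_ → Spec_compute_slot_mapping block_table block_size start end_ (compute_slot_mapping block_table block_size start end_)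

-- ===== LEMMAS AND PROOFS =====

-- shifting an integer range
theorem pv_pyRange_map_add (a b d : Int) :
    (PySem.List.pyRange a b 1).map (fun t => t + d) = PySem.List.pyRange (a + d) (b + d) 1 := by
  rw [PySem.List.pyRange_one a b, PySem.List.pyRange_one (a + d) (b + d), List.map_map]
  have h : b + d - (a + d) = b - a := by ring
  rw [h]
  exact List.map_congr_left (fun k _ => by simp [Function.comp]; ring)

-- the per-token slot function, restricted to tokens of one block, is an affine shift of the range
theorem pv_block_map (block_table : List Int) (bs : Int) (hbs : 0 < bs) (i a b : Int)
    (ha : i * bs ≤ a) (hb : b ≤ (i + 1) * bs) :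
    (PySem.List.pyRange a b 1).map (fun t =>
        PySem.List.pyGetD block_table (PySem.Int.floordiv t bs) 0 * bs + PySem.Int.mod t bs)
    = PySem.List.pyRange (PySem.List.pyGetD block_table i 0 * bs + (a - i * bs))
        (PySem.List.pyGetD block_table i 0 * bs + (b - i * bs)) 1 := by
  have hcong : ∀ t ∈ PySem.List.pyRange a b 1,
      PySem.List.pyGetD block_table (PySem.Int.floordiv t bs) 0 * bs + PySem.Int.mod t bs
        = t + (PySem.List.pyGetD block_table i 0 * bs - i * bs) := by
    intro t ht
    rw [PySem.List.mem_pyRange_one] at ht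
    have hfd : PySem.Int.floordiv t bs = i := by
      rw [PySem.Int.floordiv_eq_iff_of_pos hbs]
      constructor <;> omega
    have hmod := PySem.Int.floordiv_mul_add_mod t bs
    rw [hfd] at hmod ⊢
    omega
  rw [List.map_congr_left hcong, pv_pyRange_map_add]
  congr 1 <;> ring

-- main induction: the block-level flatMap equals the per-token map (n bounds the block count)
theorem pv_main (block_table : List Int) (bs : Int) (hbs : 0 < bs) :
    ∀ (n : Nat) (s e : Int), s < e →
      (PySem.Int.floordiv (e - 1) bs - PySem.Int.floordiv s bs).toNat = n →
      (PySem.List.pyRange (PySem.Int.floordiv s bs) (PySem.Int.floordiv (e - 1) bs + 1) 1).flatMap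
          (fun i => PySem.List.pyRange
            (PySem.List.pyGetD block_table i 0 * bs + max 0 (s - i * bs))
            (PySem.List.pyGetD block_table i 0 * bs + min bs (e - i * bs)) 1)
      = (PySem.List.pyRange s e 1).map (fun t =>
          PySem.List.pyGetD block_table (PySem.Int.floordiv t bs) 0 * bs + PySem.Int.mod t bs) := by
  intro n
  induction n with
  | zero =>
    intro s e hse hn
    set sbi := PySem.Int.floordiv s bs with hsbi
    have hb1 : sbi * bs ≤ s ∧ s < (sbi + 1) * bs := by
      rw [← PySem.Int.floordiv_eq_iff_of_pos hbs]
    have hebi : PySem.Int.floordiv (e - 1) bs = sbi := by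
      have h1 : sbi ≤ PySem.Int.floordiv (e - 1) bs := by
        rw [PySem.Int.le_floordiv_iff_mul_le hbs]; omega
      omega
    rw [hebi, PySem.List.pyRange_one_singleton]
    have hbr := (PySem.Int.floordiv_eq_iff_of_pos hbs).mp hebi
    have hmax : max 0 (s - sbi * bs) = s - sbi * bs := by omega
    have hmin : min bs (e - sbi * bs) = e - sbi * bs := by
      have : (sbi + 1) * bs = sbi * bs + bs := by ring
      omega
    simp only [List.flatMap_cons, List.flatMap_nil, List.append_nil, hmax, hmin]
    rw [pv_block_map block_table bs hbs sbi s e hb1.1 (by omega)]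
  | succ n ih =>
    intro s e hse hn
    set sbi := PySem.Int.floordiv s bs with hsbi
    have hb1 : sbi * bs ≤ s ∧ s < (sbi + 1) * bs := by
      rw [← PySem.Int.floordiv_eq_iff_of_pos hbs]
    have hexp : (sbi + 1) * bs = sbi * bs + bs := by ring
    by_cases h : e ≤ (sbi + 1) * bs
    · -- a single block after all
      have hebi : PySem.Int.floordiv (e - 1) bs = sbi := by
        rw [PySem.Int.floordiv_eq_iff_of_pos hbs]; constructor <;> omega
      rw [hebi, PySem.List.pyRange_one_singleton]
      have hmax : max 0 (s - sbi * bs) = s - sbi * bs := by omega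
      have hmin : min bs (e - sbi * bs) = e - sbi * bs := by omega
      simp only [List.flatMap_cons, List.flatMap_nil, List.append_nil, hmax, hmin]
      rw [pv_block_map block_table bs hbs sbi s e hb1.1 h]
    · -- first block is full; recurse from the next block boundary m
      set m : Int := (sbi + 1) * bs with hm
      have hsm : s < m := hb1.2
      have hme : m < e := by omega
      have hfdm : PySem.Int.floordiv m bs = sbi + 1 := by
        rw [PySem.Int.floordiv_eq_iff_of_pos hbs]; constructor <;> nlinarith
      have hebi : sbi + 1 ≤ PySem.Int.floordiv (e - 1) bs := by
        rw [PySem.Int.le_floordiv_iff_mul_le hbs]; omega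
      -- split the token range at m
      rw [PySem.List.pyRange_one_append s m e (by omega) (by omega), List.map_append]
      -- split the block range: head sbi, then the rest
      rw [PySem.List.pyRange_one_cons (by omega)]
      simp only [List.flatMap_cons]
      congr 1
      · -- head block = tokens [s, m)
        have hmax : max 0 (s - sbi * bs) = s - sbi * bs := by omega
        have hmin : min bs (e - sbi * bs) = bs := by omega
        rw [hmax, hmin,
          pv_block_map block_table bs hbs sbi s m hb1.1 (by omega)]
        congr 1
        omega
      · -- tail blocks: rewrite s-dependence away, then apply the IH at s := m
        have hcong : ∀ i ∈ PySem.List.pyRange (sbi + 1) (PySem.Int.floordiv (e - 1) bs + 1) 1,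
            PySem.List.pyRange
              (PySem.List.pyGetD block_table i 0 * bs + max 0 (s - i * bs))
              (PySem.List.pyGetD block_table i 0 * bs + min bs (e - i * bs)) 1
            = PySem.List.pyRange
              (PySem.List.pyGetD block_table i 0 * bs + max 0 (m - i * bs))
              (PySem.List.pyGetD block_table i 0 * bs + min bs (e - i * bs)) 1 := by
          intro i hi
          rw [PySem.List.mem_pyRange_one] at hi
          have hib : m ≤ i * bs := by
            calc m = (sbi + 1) * bs := rfl
            _ ≤ i * bs := by
              have := mul_le_mul_of_nonneg_right hi.1 hbs.le
              linarith
          have e1 : max 0 (s - i * bs) = 0 := by omega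
          have e2 : max 0 (m - i * bs) = 0 := by omega
          rw [e1, e2]
        have htail := ih m e hme (by omega)
        rw [hfdm] at htail
        calc (PySem.List.pyRange (sbi + 1) (PySem.Int.floordiv (e - 1) bs + 1) 1).flatMap
              (fun i => PySem.List.pyRange
                (PySem.List.pyGetD block_table i 0 * bs + max 0 (s - i * bs))
                (PySem.List.pyGetD block_table i 0 * bs + min bs (e - i * bs)) 1)
            = (PySem.List.pyRange (sbi + 1) (PySem.Int.floordiv (e - 1) bs + 1) 1).flatMap
              (fun i => PySem.List.pyRange
                (PySem.List.pyGetD block_table i 0 * bs + max 0 (m - i * bs))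
                (PySem.List.pyGetD block_table i 0 * bs + min bs (e - i * bs)) 1) := by
              simp only [List.flatMap_def]
              exact congrArg List.flatten (List.map_congr_left hcong)
        _ = _ := htail

-- ===== VERDICT (by name: the statement is the Claim_ definition above) =====
theorem compute_slot_mapping_spec : Claim_equal_compute_slot_mapping := by
  intro block_table block_size start end_ _hdom hpre
  unfold Spec_compute_slot_mapping compute_slot_mapping compute_slot_mapping_alt
  by_cases hge : start ≥ end_
  · rw [if_pos hge, PySem.List.pyRange_one_eq_nil (by omega), List.map_nil]
  · rw [if_neg hge]
    have hbs : 0 < block_size := by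
      rcases hpre with h | h
      · omega
      · exact h.1
    simp only []
    rw [PySem.List.foldl_append_eq_flatMap, List.nil_append]
    exact pv_main block_table block_size hbs _ start end_ (by omega) rfl
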